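-- pv_equiv track=rewrite | github.com/Leo-Shogun/Quantum-Networks | scheduling.py | check_failures_across_schedules
-- ===== SOURCE A (Python) =====
-- from typing import List, Dict, Tuple
--
-- def check_failures_across_schedules(schedules: Dict[str, List[Tuple[str, int]]],
--                                     high_weight_paths: Dict[str, Tuple[List[str], List[str]]],
--                                     failure_nodes: Dict[int, List[int]]) -> Dict[str, Dict[int, List[str]]]:
--     """
--     Check failures across multiple schedules and return a dictionary of failed requests per schedule type.
--     """
--     all_failed_requests = {}
--     for schedule_name, schedule in schedules.items():
--         failed_requests_by_timeslot = {}
--         for timeslot, nodes in failure_nodes.items():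
--             failed_requests_by_timeslot[timeslot] = []
--             for request_id, ts in schedule:
--                 if ts == timeslot:
--                     paths = high_weight_paths[request_id]
--                     all_paths_fail = all(any(int(node[1:]) in nodes for node in path) for path in paths)
--                     if all_paths_fail:
--                         failed_requests_by_timeslot[timeslot].append(request_id)
--             if not failed_requests_by_timeslot[timeslot]:
--                 failed_requests_by_timeslot[timeslot].append(f"{schedule_name}在这个时隙无requests")
--         all_failed_requests[schedule_name] = failed_requests_by_timeslot
--     return all_failed_requests
-- ===== SOURCE B (Python) =====
-- def check_failures_across_schedules(schedules, high_weight_paths, failure_nodes):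
--     """
--     Same result as A, but each schedule is indexed by timeslot once, so a failure
--     timeslot costs one index lookup instead of a rescan of the whole schedule;
--     failure node lists become sets before the per-request path check.
--     """
--     result = {}
--     for schedule_name, schedule in schedules.items():
--         by_ts = {}
--         for request_id, ts in schedule:
--             by_ts.setdefault(ts, []).append(request_id)
--         sent = [f"{schedule_name}在这个时隙无requests"]
--         failed_by_ts = {}
--         index_get = by_ts.get
--         for timeslot, nodes in failure_nodes.items():
--             rids = index_get(timeslot)
--             if rids:
--                 nodeset = set(nodes)
--                 failed = [rid for rid in rids
--                           if all(any(int(node[1:]) in nodeset for node in path)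
--                                  for path in high_weight_paths[rid])]
--                 failed_by_ts[timeslot] = failed or sent
--             else:
--                 failed_by_ts[timeslot] = sent
--         result[schedule_name] = failed_by_ts
--     return result
-- ===== Notes on version B (the rewrite author's own statement) =====
-- stated objective: faster
-- what changed: B indexes each schedule by timeslot into a dict once, so each failure timeslot costs one index lookup instead of rescanning the whole schedule, and failure node lists become sets before the per-request path check; intended as faster — a timing run measured 1.7x-2.5x where both sides finished, below its confirmation threshold at the deciding rung (recorded as unconfirmed).
import Mathlib
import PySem

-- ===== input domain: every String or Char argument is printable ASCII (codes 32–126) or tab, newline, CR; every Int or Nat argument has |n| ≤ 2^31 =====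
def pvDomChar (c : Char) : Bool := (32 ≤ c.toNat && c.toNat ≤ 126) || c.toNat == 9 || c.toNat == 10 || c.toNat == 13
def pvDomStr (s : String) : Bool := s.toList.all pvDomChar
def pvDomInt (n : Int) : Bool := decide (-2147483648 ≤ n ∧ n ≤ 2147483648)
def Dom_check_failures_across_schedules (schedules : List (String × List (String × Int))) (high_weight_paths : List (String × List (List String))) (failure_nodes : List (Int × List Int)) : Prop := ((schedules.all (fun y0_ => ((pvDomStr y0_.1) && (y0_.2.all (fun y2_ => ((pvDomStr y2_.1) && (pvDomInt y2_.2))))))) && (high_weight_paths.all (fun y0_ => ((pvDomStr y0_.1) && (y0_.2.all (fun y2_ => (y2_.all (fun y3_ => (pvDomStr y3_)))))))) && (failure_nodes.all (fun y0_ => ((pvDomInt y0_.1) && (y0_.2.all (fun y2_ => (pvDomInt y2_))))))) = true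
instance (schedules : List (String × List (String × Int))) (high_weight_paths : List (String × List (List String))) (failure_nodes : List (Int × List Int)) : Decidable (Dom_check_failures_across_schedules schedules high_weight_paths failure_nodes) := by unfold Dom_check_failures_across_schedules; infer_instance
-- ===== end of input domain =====

-- B indexes each schedule by timeslot once, so a failure timeslot costs one lookup instead of a
-- schedule rescan (intended faster; a timing run
-- measured 1.7x-2.5x where both sides finished, recorded as unconfirmed).

-- int(node[1:]) — shared by both ports; the .getD 0 default is unreachable inside Pre_
def pvNodeInt (node : String) : Int :=
  (PySem.Int.ofStr? (PySem.Str.slice node (some 1) none)).getD 0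

-- ===== PORT A =====
def check_failures_across_schedules (schedules : List (String × List (String × Int))) (high_weight_paths : List (String × List (List String))) (failure_nodes : List (Int × List Int)) : List (String × List (Int × List String)) :=
  (schedules.foldl (fun all_failed_requests sp =>
      let failed_requests_by_timeslot : PySem.Dict Int (List String) :=
        failure_nodes.foldl (fun frbt tn =>
          -- scan the WHOLE schedule for entries with ts == timeslot, as A does
          let lst : List String :=
            sp.2.foldl (fun lst e =>
              if e.2 == tn.1 then
                let paths := (PySem.Dict.mk high_weight_paths).getD e.1 []
                if paths.all (fun path => path.any (fun node => tn.2.contains (pvNodeInt node))) then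
                  lst ++ [e.1]
                else lst
              else lst) []
          frbt.insert tn.1 (if lst.isEmpty then [sp.1 ++ "在这个时隙无requests"] else lst))
          PySem.Dict.empty
      all_failed_requests.insert sp.1 failed_requests_by_timeslot.items)
    (PySem.Dict.empty : PySem.Dict String (List (Int × List String)))).items

-- ===== PORT B =====
def check_failures_across_schedules_alt (schedules : List (String × List (String × Int))) (high_weight_paths : List (String × List (List String))) (failure_nodes : List (Int × List Int)) : List (String × List (Int × List String)) :=
  (schedules.foldl (fun result sp =>
      -- index the schedule by timeslot once (by_ts.setdefault(ts, []).append(rid))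
      let by_ts : PySem.Dict Int (List String) :=
        sp.2.foldl (fun d e => d.modify e.2 [] (fun x => x ++ [e.1])) PySem.Dict.empty
      let sent : List String := [sp.1 ++ "在这个时隙无requests"]
      let failed_by_ts : PySem.Dict Int (List String) :=
        failure_nodes.foldl (fun d tn =>
          let rids := by_ts.getD tn.1 []   -- by_ts.get(timeslot); 'if rids:' = non-None and non-empty
          if rids.isEmpty then d.insert tn.1 sent
          else
            let nodeset : PySem.Set Int := PySem.Set.ofList tn.2
            let failed : List String :=
              rids.filter (fun rid =>
                ((PySem.Dict.mk high_weight_paths).getD rid []).all (fun path =>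
                  path.any (fun node => PySem.Set.contains nodeset (pvNodeInt node))))
            d.insert tn.1 (if failed.isEmpty then sent else failed))
          PySem.Dict.empty
      result.insert sp.1 failed_by_ts.items)
    (PySem.Dict.empty : PySem.Dict String (List (Int × List String)))).items

-- ===== PRECONDITION & SPEC =====
-- Pre_ excludes the inputs where Python A raises: a scheduled request whose timeslot occurs in
-- failure_nodes but whose id is missing from high_weight_paths (KeyError), or whose paths hold a
-- node string not of the form <char><int> (ValueError in int(node[1:])).  The parse requirement
-- covers ALL nodes of such a request's paths, which is slightly narrower than A's raise set:
-- short-circuiting of any/all can let A return although a later node is unparseable.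
def Pre_check_failures_across_schedules (schedules : List (String × List (String × Int))) (high_weight_paths : List (String × List (List String))) (failure_nodes : List (Int × List Int)) : Prop :=
  (schedules.all (fun sp => sp.2.all (fun e =>
    !(failure_nodes.any (fun tn => tn.1 == e.2)) ||
      ((PySem.Dict.mk high_weight_paths).contains e.1 &&
       ((PySem.Dict.mk high_weight_paths).getD e.1 []).all (fun path => path.all (fun node =>
         (PySem.Int.ofStr? (PySem.Str.slice node (some 1) none)).isSome))))) : Bool) = true
instance (schedules : List (String × List (String × Int))) (high_weight_paths : List (String × List (List String))) (failure_nodes : List (Int × List Int)) : Decidable (Pre_check_failures_across_schedules schedules high_weight_paths failure_nodes) := by unfold Pre_check_failures_across_schedules; infer_instance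

def pvWitness_check_failures_across_schedules : (List (String × List (String × Int))) × (List (String × List (List String))) × (List (Int × List Int)) :=
  ([("A", [("r1", 0), ("r2", 1)]), ("B", [])],
   [("r1", [["v1", "v2"], ["v3"]]), ("r2", [["v2"]])],
   [(0, [1, 3]), (1, [])])

def Spec_check_failures_across_schedules (schedules : List (String × List (String × Int))) (high_weight_paths : List (String × List (List String))) (failure_nodes : List (Int × List Int)) (out : List (String × List (Int × List String))) : Prop := out = check_failures_across_schedules_alt schedules high_weight_paths failure_nodes
instance (schedules : List (String × List (String × Int))) (high_weight_paths : List (String × List (List String))) (failure_nodes : List (Int × List Int)) (out : List (String × List (Int × List String))) : Decidable (Spec_check_failures_across_schedules schedules high_weight_paths failure_nodes out) := by unfold Spec_check_failures_across_schedules; infer_instance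

-- ===== CLAIM (what is proved, stated in full; the proofs are below) =====
def Claim_equal_check_failures_across_schedules : Prop := ∀ (schedules : List (String × List (String × Int))) (high_weight_paths : List (String × List (List String))) (failure_nodes : List (Int × List Int)), Dom_check_failures_across_schedules schedules high_weight_paths failure_nodes → Pre_check_failures_across_schedules schedules high_weight_paths failure_nodes → Spec_check_failures_across_schedules schedules high_weight_paths failure_nodes (check_failures_across_schedules schedules high_weight_paths failure_nodes)

-- ===== LEMMAS AND PROOFS =====

-- B's timeslot index reads back exactly the requests A's inner scan visits, in order
theorem pv_by_ts (sched : List (String × Int)) (ts : Int) :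
    ((sched.foldl (fun d e => d.modify e.2 [] (fun x => x ++ [e.1])) PySem.Dict.empty).getD ts [])
      = (sched.filter (fun e => e.2 == ts)).map (fun e => e.1) := by
  have h := PySem.Dict.getD_foldl_modify_append (sched.map (fun e => (e.2, e.1)))
      (PySem.Dict.empty : PySem.Dict Int (List String)) ts
  rw [List.foldl_map] at h
  simpa [List.filter_map, Function.comp] using h

-- the per-(schedule, timeslot) cell computed by A equals B's
theorem pv_cell (hwp : List (String × List (List String))) (sched : List (String × Int))
    (ts : Int) (nodes : List Int) :
    (sched.foldl (fun lst e =>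
        if e.2 == ts then
          if ((PySem.Dict.mk hwp).getD e.1 []).all (fun path =>
              path.any (fun node => nodes.contains (pvNodeInt node))) then
            lst ++ [e.1]
          else lst
        else lst) [])
      = (((sched.foldl (fun d e => d.modify e.2 [] (fun x => x ++ [e.1])) PySem.Dict.empty).getD ts []).filter
          (fun rid => ((PySem.Dict.mk hwp).getD rid []).all (fun path =>
            path.any (fun node => PySem.Set.contains (PySem.Set.ofList nodes) (pvNodeInt node))))) := by
  rw [pv_by_ts]
  have hif := PySem.List.foldl_append_if
    (fun e : String × Int => e.2 == ts &&
      ((PySem.Dict.mk hwp).getD e.1 []).all (fun path =>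
        path.any (fun node => nodes.contains (pvNodeInt node))))
    (fun e => e.1) sched []
  simp only [List.nil_append] at hif
  have hcongr : ∀ (acc : List String), ∀ e ∈ sched,
      (if e.2 == ts then
        if ((PySem.Dict.mk hwp).getD e.1 []).all (fun path =>
            path.any (fun node => nodes.contains (pvNodeInt node))) then
          acc ++ [e.1]
        else acc
      else acc)
      = (if (e.2 == ts &&
          ((PySem.Dict.mk hwp).getD e.1 []).all (fun path =>
            path.any (fun node => nodes.contains (pvNodeInt node)))) then acc ++ [e.1] else acc) := by
    intro acc e _
    by_cases h1 : (e.2 == ts) = true <;> simp [h1]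
  rw [PySem.List.foldl_congr_mem sched _ _ [] hcongr, hif, List.filter_map, List.filter_filter]
  congr 1
  apply List.filter_congr
  intro e _
  simp [PySem.Set.contains, PySem.Set.mem_ofList, Function.comp, Bool.and_comm]

-- ===== VERDICT (by name: the statement is the Claim_ definition above) =====
theorem check_failures_across_schedules_spec : Claim_equal_check_failures_across_schedules := by
  intro schedules hwp fns _ _
  unfold Spec_check_failures_across_schedules
  unfold check_failures_across_schedules check_failures_across_schedules_alt
  congr 1
  apply PySem.List.foldl_congr_mem
  intro acc sp _
  dsimp only
  congr 2
  apply PySem.List.foldl_congr_mem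
  intro d tn _
  dsimp only
  rw [pv_cell hwp sp.2 tn.1 tn.2]
  by_cases h : ((sp.2.foldl (fun d e => d.modify e.2 [] (fun x => x ++ [e.1])) PySem.Dict.empty).getD tn.1 []).isEmpty = true
  · rw [List.isEmpty_iff] at h
    simp [h]
  · simp [h]
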